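-- pv_equiv track=rewrite | github.com/chriskarpovich/interview_prep | CTCI/chapter_05/p01_insertion.py | bits_insertion
-- ===== SOURCE A (Python) =====
-- def bits_insertion(num, m, i, j):
--     # do a linear search through the bits of M (from tail to head, right to left)
--     # and if you find 1, do a bit insertion to N
--     # if you find 0, clear idxth bit of N using a mask
--     m_idx = 0
--     for idx in range(j - i + 1):
--         # if the digit is a zero, clear that bit of N using a mask
--         # if the digit is not a zero, do a bit insertion to N
--         if (m >> idx) & 1 != 0:
--             # set bit to 1. if it was already 1 then it stays 1. need offset of i to the left to get to correct position
--             mask = (1 << idx + i)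
--             num = num | mask
--         else:
--             # clear bit
--             mask = ~(1 << idx + i)
--             num = num & mask
--     return num
-- ===== SOURCE B (Python) =====
-- def bits_insertion(num, m, i, j):
--     # clear bits i..j of num in one masked AND, then OR in the low
--     # (j-i+1) bits of m shifted into place: no per-bit loop.
--     width = j - i + 1
--     if width <= 0:
--         return num
--     mask = (1 << width) - 1
--     return (num & ~(mask << i)) | ((m & mask) << i)
-- ===== Notes on version B (the rewrite author's own statement) =====
-- stated objective: alternative
-- what changed: Replaces A's per-bit loop over positions i..j (test each bit of m, set or clear the corresponding bit of num one position at a time) by a single mask-and-shift expression: clear bits i..j of num with one AND, then OR in the low j-i+1 bits of m shifted left by i.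
import Mathlib
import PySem

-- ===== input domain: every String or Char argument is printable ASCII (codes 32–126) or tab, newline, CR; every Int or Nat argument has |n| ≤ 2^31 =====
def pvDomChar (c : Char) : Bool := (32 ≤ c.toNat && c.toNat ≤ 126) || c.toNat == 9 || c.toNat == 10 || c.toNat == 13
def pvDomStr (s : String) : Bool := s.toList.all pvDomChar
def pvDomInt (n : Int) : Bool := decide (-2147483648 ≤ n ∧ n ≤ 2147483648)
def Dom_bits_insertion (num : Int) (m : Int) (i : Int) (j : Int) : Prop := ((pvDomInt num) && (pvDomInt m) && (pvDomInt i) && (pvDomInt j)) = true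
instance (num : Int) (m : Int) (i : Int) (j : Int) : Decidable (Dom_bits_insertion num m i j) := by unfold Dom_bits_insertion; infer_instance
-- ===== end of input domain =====

-- B replaces A's per-bit loop over positions i..j by a single mask-and-shift
-- (clear bits i..j of num with one AND, then OR in the low j-i+1 bits of m shifted by i).

-- ===== PORT A =====
def bits_insertion (num : Int) (m : Int) (i : Int) (j : Int) : Int :=
  (PySem.List.pyRange 0 (j - i + 1)).foldl
    (fun acc idx =>
      if PySem.Int.band (m >>> idx.toNat) 1 ≠ 0 then
        PySem.Int.bor acc ((1 : Int) <<< (idx + i).toNat)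
      else
        PySem.Int.band acc (Int.not ((1 : Int) <<< (idx + i).toNat)))
    num

-- ===== PORT B =====
def bits_insertion_alt (num : Int) (m : Int) (i : Int) (j : Int) : Int :=
  if j - i + 1 ≤ 0 then num
  else
    let mask : Int := ((1 : Int) <<< (j - i + 1).toNat) - 1
    PySem.Int.bor (PySem.Int.band num (Int.not (mask <<< i.toNat)))
                  (PySem.Int.band m mask <<< i.toNat)

-- ===== PRECONDITION & SPEC =====
-- Pre_ excludes exactly the inputs where Python A raises ValueError ("negative shift
-- count"): i < 0 while the loop is non-empty (i ≤ j).  B raises there too.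
def Pre_bits_insertion (num : Int) (m : Int) (i : Int) (j : Int) : Prop := 0 ≤ i ∨ j < i
instance (num : Int) (m : Int) (i : Int) (j : Int) : Decidable (Pre_bits_insertion num m i j) := by unfold Pre_bits_insertion; infer_instance

def pvWitness_bits_insertion : Int × Int × Int × Int := (1024, 19, 2, 6)

def Spec_bits_insertion (num : Int) (m : Int) (i : Int) (j : Int) (out : Int) : Prop := out = bits_insertion_alt num m i j
instance (num : Int) (m : Int) (i : Int) (j : Int) (out : Int) : Decidable (Spec_bits_insertion num m i j out) := by unfold Spec_bits_insertion; infer_instance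

-- ===== CLAIM (what is proved, stated in full; the proofs are below) =====
def Claim_equal_bits_insertion : Prop := ∀ (num : Int) (m : Int) (i : Int) (j : Int), Dom_bits_insertion num m i j → Pre_bits_insertion num m i j → Spec_bits_insertion num m i j (bits_insertion num m i j)

-- ===== LEMMAS AND PROOFS =====

-- bit-level toolkit -----------------------------------------------------------

theorem tb_ext (a b : Int) (h : ∀ k, a.testBit k = b.testBit k) : a = b := by
  cases a with
  | ofNat m => cases b with
    | ofNat n =>
      have := Nat.eq_of_testBit_eq (x := m) (y := n) (fun k => h k)
      simp [this]
    | negSucc n =>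
      exfalso
      have hk := h (m ⊔ n + 1)
      have h1 : m.testBit (m ⊔ n + 1) = false :=
        Nat.testBit_lt_two_pow (lt_of_le_of_lt (le_max_left m n)
          (Nat.lt_two_pow_self.trans_le (Nat.pow_le_pow_right (by omega) (by omega))))
      have h2 : n.testBit (m ⊔ n + 1) = false :=
        Nat.testBit_lt_two_pow (lt_of_le_of_lt (le_max_right m n)
          (Nat.lt_two_pow_self.trans_le (Nat.pow_le_pow_right (by omega) (by omega))))
      simp [Int.testBit, h1, h2] at hk
  | negSucc m => cases b with
    | ofNat n =>
      exfalso
      have hk := h (m ⊔ n + 1)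
      have h1 : m.testBit (m ⊔ n + 1) = false :=
        Nat.testBit_lt_two_pow (lt_of_le_of_lt (le_max_left m n)
          (Nat.lt_two_pow_self.trans_le (Nat.pow_le_pow_right (by omega) (by omega))))
      have h2 : n.testBit (m ⊔ n + 1) = false :=
        Nat.testBit_lt_two_pow (lt_of_le_of_lt (le_max_right m n)
          (Nat.lt_two_pow_self.trans_le (Nat.pow_le_pow_right (by omega) (by omega))))
      simp [Int.testBit, h1, h2] at hk
    | negSucc n =>
      have := Nat.eq_of_testBit_eq (x := m) (y := n) (fun k => by
        have := h k; simpa [Int.testBit] using this)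
      simp [this]

theorem ldiff_div_two (m n : Nat) : Nat.ldiff m n / 2 = Nat.ldiff (m / 2) (n / 2) := by
  apply Nat.eq_of_testBit_eq
  intro k
  simp [Nat.testBit_div_two, Nat.testBit_ldiff]

theorem ldiff_mod_two (m n : Nat) :
    Nat.ldiff m n % 2 = if m % 2 = 1 ∧ ¬ n % 2 = 1 then 1 else 0 := by
  have h2 := Nat.testBit_zero (Nat.ldiff m n)
  rw [Nat.testBit_ldiff, Nat.testBit_zero, Nat.testBit_zero] at h2
  have hl := Nat.mod_two_eq_zero_or_one (Nat.ldiff m n)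
  rcases Nat.mod_two_eq_zero_or_one m with hm | hm <;>
    rcases Nat.mod_two_eq_zero_or_one n with hn | hn <;>
      simp [hm, hn] at h2 ⊢ <;> omega

theorem and_mod_two (m n : Nat) :
    (m &&& n) % 2 = if m % 2 = 1 ∧ n % 2 = 1 then 1 else 0 := by
  have h := Nat.and_mod_two_eq_one (a := m) (b := n)
  have h0 := Nat.mod_two_eq_zero_or_one (m &&& n)
  split_ifs with hc
  · exact h.mpr hc
  · rcases h0 with h0 | h1
    · exact h0
    · exact absurd (h.mp h1) hc

theorem nat_and_add_ldiff (m n : Nat) : (m &&& n) + Nat.ldiff m n = m := by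
  induction m using Nat.strong_induction_on generalizing n with
  | _ m ih =>
    rcases Nat.eq_zero_or_pos m with hm | hm
    · subst hm
      have : Nat.ldiff 0 n = 0 := by
        apply Nat.eq_of_testBit_eq; intro k; simp [Nat.testBit_ldiff]
      simp [Nat.zero_and, this]
    · have hIH := ih (m / 2) (by omega) (n / 2)
      have ha : (m &&& n) = 2 * ((m / 2) &&& (n / 2)) + (m &&& n) % 2 := by
        rw [← Nat.and_div_two]; omega
      have hl : Nat.ldiff m n = 2 * (Nat.ldiff (m / 2) (n / 2)) + (Nat.ldiff m n) % 2 := by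
        rw [← ldiff_div_two]; omega
      have e1 := and_mod_two m n
      have e2 := ldiff_mod_two m n
      have := Nat.mod_two_eq_zero_or_one m
      have := Nat.mod_two_eq_zero_or_one n
      split_ifs at e1 e2 <;> omega

theorem nat_sub_and_eq_ldiff (m n : Nat) : m - (m &&& n) = Nat.ldiff m n := by
  have := nat_and_add_ldiff m n; omega

theorem band_eq_land (a b : Int) : PySem.Int.band a b = Int.land a b := by
  cases a with
  | ofNat m => cases b with
    | ofNat n => simp [PySem.Int.band, Int.land]
    | negSucc n =>
      simp [PySem.Int.band, Int.land, Int.negSucc_eq, nat_sub_and_eq_ldiff]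
      intro h; exact absurd h (by omega)
  | negSucc m => cases b with
    | ofNat n =>
      simp [PySem.Int.band, Int.land, Int.negSucc_eq, nat_sub_and_eq_ldiff]
      intro h; exact absurd h (by omega)
    | negSucc n =>
      simp [PySem.Int.band, Int.land, Int.negSucc_eq]
      omega

theorem bor_eq_lor (a b : Int) : PySem.Int.bor a b = Int.lor a b := by
  cases a with
  | ofNat m => cases b with
    | ofNat n => simp [PySem.Int.bor, Int.lor]
    | negSucc n =>
      simp [PySem.Int.bor, Int.lor, Int.negSucc_eq, nat_sub_and_eq_ldiff]
      omega
  | negSucc m => cases b with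
    | ofNat n =>
      simp [PySem.Int.bor, Int.lor, Int.negSucc_eq, nat_sub_and_eq_ldiff]
      omega
    | negSucc n =>
      simp [PySem.Int.bor, Int.lor, Int.negSucc_eq]
      omega

theorem not_eq_lnot (a : Int) : Int.not a = Int.lnot a := by
  cases a <;> rfl

theorem tb_band (a b : Int) (k : Nat) :
    (PySem.Int.band a b).testBit k = (a.testBit k && b.testBit k) := by
  rw [band_eq_land]; exact Int.testBit_land a b k

theorem tb_bor (a b : Int) (k : Nat) :
    (PySem.Int.bor a b).testBit k = (a.testBit k || b.testBit k) := by
  rw [bor_eq_lor]; exact Int.testBit_lor a b k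

theorem tb_not (a : Int) (k : Nat) : (Int.not a).testBit k = !a.testBit k := by
  rw [not_eq_lnot]; exact Int.testBit_lnot a k

theorem one_shl_int (s : Nat) : ((1 : Int) <<< s) = Int.ofNat (2 ^ s) := by
  show Int.ofNat (1 <<< s) = _
  rw [Nat.shiftLeft_eq]; norm_num

theorem tb_shl_nonneg (n s k : Nat) :
    ((n : Int) <<< s).testBit k = (decide (s ≤ k) && (n : Int).testBit (k - s)) := by
  show (Int.ofNat (n <<< s)).testBit k = _
  simp [Int.testBit, Nat.testBit_shiftLeft, ge_iff_le]

theorem tb_shl (a : Int) (ha : 0 ≤ a) (s k : Nat) :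
    (a <<< s).testBit k = (decide (s ≤ k) && a.testBit (k - s)) := by
  obtain ⟨n, rfl⟩ := Int.eq_ofNat_of_zero_le ha
  exact tb_shl_nonneg n s k

theorem tb_one_shl (s k : Nat) : ((1 : Int) <<< s).testBit k = decide (k = s) := by
  rw [one_shl_int]
  show (2 ^ s : Nat).testBit k = _
  rw [Nat.testBit_two_pow]
  simp [eq_comm]

theorem mask_eq (w : Nat) : ((1 : Int) <<< w) - 1 = Int.ofNat (2 ^ w - 1) := by
  rw [one_shl_int, Int.ofNat_eq_natCast, Int.ofNat_eq_natCast,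
    Nat.cast_sub Nat.one_le_two_pow]
  norm_num

theorem tb_mask (w k : Nat) : (((1 : Int) <<< w) - 1).testBit k = decide (k < w) := by
  rw [mask_eq]
  exact Nat.testBit_two_pow_sub_one w k

theorem cond_bit (m : Int) (s : Nat) :
    (PySem.Int.band (m >>> s) 1 ≠ 0) ↔ m.testBit s = true := by
  rw [band_eq_land]
  cases m with
  | ofNat n =>
    have e1 : (n >>> s) &&& 1 = (n >>> s) % 2 := Nat.and_one_is_mod _
    have e2 : 1 &&& (n >>> s) = (n >>> s) % 2 := by
      rw [Nat.and_comm]; exact Nat.and_one_is_mod _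
    show Int.land (Int.ofNat (n >>> s)) (Int.ofNat 1) ≠ 0 ↔ _
    have h : Int.land (Int.ofNat (n >>> s)) (Int.ofNat 1) = Int.ofNat ((n >>> s) &&& 1) := rfl
    rw [h, e1]
    simp [Int.testBit, Nat.testBit, e2]
    rw [show ((n : Int) >>> s) = ((n >>> s : Nat) : Int) from rfl]
    omega
  | negSucc n =>
    have e2 : 1 &&& (n >>> s) = (n >>> s) % 2 := by
      rw [Nat.and_comm]; exact Nat.and_one_is_mod _
    have e3 : Nat.ldiff 1 (n >>> s) = 1 - (n >>> s) % 2 := by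
      rw [← nat_sub_and_eq_ldiff, e2]
    show Int.land (Int.negSucc (n >>> s)) (Int.ofNat 1) ≠ 0 ↔ _
    have h : Int.land (Int.negSucc (n >>> s)) (Int.ofNat 1) = Int.ofNat (Nat.ldiff 1 (n >>> s)) := rfl
    rw [h, e3]
    have := Nat.mod_two_eq_zero_or_one (n >>> s)
    simp [Int.testBit, Nat.testBit, e2]
    omega

-- characterization of A's fold ------------------------------------------------

theorem foldA (num m i : Int) (hi : 0 ≤ i) (w : Nat) (k : Nat) :
    (((PySem.List.pyRange 0 (w : Int)).foldl
      (fun acc idx =>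
        if PySem.Int.band (m >>> idx.toNat) 1 ≠ 0 then
          PySem.Int.bor acc ((1 : Int) <<< (idx + i).toNat)
        else
          PySem.Int.band acc (Int.not ((1 : Int) <<< (idx + i).toNat))) num).testBit k)
    = if i.toNat ≤ k ∧ k < i.toNat + w then m.testBit (k - i.toNat) else num.testBit k := by
  induction w with
  | zero =>
    rw [show ((0 : Nat) : Int) = 0 from rfl, PySem.List.pyRange_one_eq_nil le_rfl]
    simp only [List.foldl_nil]
    split_ifs with h
    · omega
    · rfl
  | succ w ih =>
    have hcast : ((w + 1 : Nat) : Int) = (w : Int) + 1 := by push_cast; ring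
    rw [hcast, PySem.List.pyRange_one_succ_right (by positivity), List.foldl_append]
    simp only [List.foldl_cons, List.foldl_nil]
    have htn : ((w : Int)).toNat = w := Int.toNat_natCast w
    have hsn : ((w : Int) + i).toNat = w + i.toNat := by omega
    rw [Int.shiftRight_natCast_right, htn]
    by_cases hc : PySem.Int.band (m >>> w) 1 ≠ 0
    · rw [if_pos hc, tb_bor, ih, tb_one_shl]
      have hbit : m.testBit w = true := (cond_bit m w).mp hc
      rw [hsn]
      by_cases hk : k = w + i.toNat
      · subst hk
        rw [if_pos (by omega : i.toNat ≤ w + i.toNat ∧ w + i.toNat < i.toNat + (w + 1))]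
        have hww : w + i.toNat - i.toNat = w := by omega
        rw [hww, hbit]
        simp
      · have hd : decide (k = w + i.toNat) = false := by simp [hk]
        rw [hd, Bool.or_false]
        split_ifs with h1 h2 h2 <;> first | rfl | omega
    · rw [if_neg hc, tb_band, ih, tb_not, tb_one_shl]
      have hbit : m.testBit w = false := by
        rcases Bool.eq_false_or_eq_true (m.testBit w) with h | h
        · exact absurd ((cond_bit m w).mpr h) hc
        · exact h
      rw [hsn]
      by_cases hk : k = w + i.toNat
      · subst hk
        rw [if_neg (by omega : ¬ (i.toNat ≤ w + i.toNat ∧ w + i.toNat < i.toNat + w)),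
          if_pos (by omega : i.toNat ≤ w + i.toNat ∧ w + i.toNat < i.toNat + (w + 1))]
        have hww : w + i.toNat - i.toNat = w := by omega
        rw [hww, hbit]
        simp
      · have hd : decide (k = w + i.toNat) = false := by simp [hk]
        rw [hd]
        simp only [Bool.not_false, Bool.and_true]
        split_ifs with h1 h2 h2 <;> first | rfl | omega

-- ===== VERDICT (by name: the statement is the Claim_ definition above) =====
theorem bits_insertion_spec : Claim_equal_bits_insertion := by
  intro num m i j _ hpre
  unfold Spec_bits_insertion bits_insertion bits_insertion_alt
  by_cases hje : j - i + 1 ≤ 0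
  · rw [if_pos hje, PySem.List.pyRange_one_eq_nil (by omega)]
    rfl
  · rcases hpre with hi | hlt
    swap
    · omega
    rw [if_neg hje]
    have hw : j - i + 1 = ((j - i + 1).toNat : Int) := by omega
    set w := (j - i + 1).toNat with hwdef
    rw [hw]
    apply tb_ext
    intro k
    rw [foldA num m i hi w k]
    have hmasknn : (0 : Int) ≤ ((1 : Int) <<< w) - 1 := by
      rw [mask_eq]; exact Int.ofNat_nonneg _
    have hbandnn : (0 : Int) ≤ PySem.Int.band m (((1 : Int) <<< w) - 1) := by
      rw [PySem.Int.band_comm]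
      exact PySem.Int.band_nonneg_of_nonneg_left m hmasknn
    rw [tb_bor, tb_band, tb_not, tb_shl _ hmasknn, tb_shl _ hbandnn, tb_band, tb_mask]
    split_ifs with h3 <;>
      by_cases h1 : i.toNat ≤ k <;> by_cases h2 : k - i.toNat < w <;>
        simp [h1, h2] <;> omega
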